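-- pv_equiv track=rewrite | github.com/opengauss-mirror/openGauss-DBMind | dbmind/common/ha.py | check_param_validity
-- ===== SOURCE A (Python) =====
-- def check_param_validity(cmd, component_type):
--     if not cmd.strip():
--         return False
--     if component_type not in cmd:
--         return False
--     param_list = cmd.split(' ')
--     while '' in param_list:
--         param_list.remove('')
--     param_set = set(param_list)
--     if len(param_set) < len(param_list):
--         return False
--     return True
-- ===== SOURCE B (Python) =====
-- def check_param_validity(cmd, component_type):
--     if not cmd.strip():
--         return False
--     if component_type not in cmd:
--         return False
--     seen = set()
--     for p in cmd.split(' '):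
--         if p == '':
--             continue
--         if p in seen:
--             return False
--         seen.add(p)
--     return True
-- ===== Notes on version B (the rewrite author's own statement) =====
-- stated objective: alternative
-- what changed: Replaces A's build-list / while-remove-empties / set-length comparison with a single left-to-right pass over the split that skips empty pieces and returns False at the first word already in a growing seen-set (early exit, no intermediate list).
import Mathlib
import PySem

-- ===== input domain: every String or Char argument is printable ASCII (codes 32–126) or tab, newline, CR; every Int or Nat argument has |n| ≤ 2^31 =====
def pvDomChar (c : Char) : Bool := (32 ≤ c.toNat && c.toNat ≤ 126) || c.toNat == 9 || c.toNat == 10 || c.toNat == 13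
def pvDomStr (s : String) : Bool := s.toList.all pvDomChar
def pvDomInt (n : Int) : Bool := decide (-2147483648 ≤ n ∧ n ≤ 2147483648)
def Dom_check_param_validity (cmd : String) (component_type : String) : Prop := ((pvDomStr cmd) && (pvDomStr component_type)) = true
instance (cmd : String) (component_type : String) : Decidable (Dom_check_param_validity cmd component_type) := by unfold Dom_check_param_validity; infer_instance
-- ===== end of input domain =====

-- B replaces A's list-building, while-remove-of-empties and set-length comparison by one
-- left-to-right pass with a growing seen-set and early exit (objective: alternative).

-- ===== PORT A =====
-- "while '' in param_list: param_list.remove('')" — list.remove of a member removes the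
-- first occurrence, which is List.erase (PySem.List.remove?_eq_some_erase); exact here.
def pyRemoveEmpties (l : List String) : List String :=
  if h : "" ∈ l then pyRemoveEmpties (l.erase "") else l
termination_by l.length
decreasing_by
  have h1 := List.length_erase_of_mem h
  have h2 := List.length_pos_of_mem h
  omega

def check_param_validity (cmd : String) (component_type : String) : Bool :=
  if (PySem.Str.strip cmd) == "" then false
  else if !(PySem.Str.isIn component_type cmd) then false
  else
    -- cmd.split(' '): the separator is the non-empty literal " ", so split? is some
    let param_list := (PySem.Str.split? cmd " ").getD []
    let param_list := pyRemoveEmpties param_list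
    let param_set : PySem.Set String := PySem.Set.ofList param_list
    if param_set.length < param_list.length then false else true

-- ===== PORT B =====
def altLoop : List String → PySem.Set String → Bool
  | [], _ => true
  | p :: rest, seen =>
    if p == "" then altLoop rest seen
    else if PySem.Set.contains seen p then false
    else altLoop rest (PySem.Set.add seen p)

def check_param_validity_alt (cmd : String) (component_type : String) : Bool :=
  if (PySem.Str.strip cmd) == "" then false
  else if !(PySem.Str.isIn component_type cmd) then false
  else altLoop ((PySem.Str.split? cmd " ").getD []) PySem.Set.empty

-- ===== PRECONDITION & SPEC =====
def Spec_check_param_validity (cmd : String) (component_type : String) (out : Bool) : Prop := out = check_param_validity_alt cmd component_type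
instance (cmd : String) (component_type : String) (out : Bool) : Decidable (Spec_check_param_validity cmd component_type out) := by unfold Spec_check_param_validity; infer_instance

-- ===== CLAIM (what is proved, stated in full; the proofs are below) =====
def Claim_equal_check_param_validity : Prop := ∀ (cmd : String) (component_type : String), Dom_check_param_validity cmd component_type → Spec_check_param_validity cmd component_type (check_param_validity cmd component_type)

-- ===== LEMMAS AND PROOFS =====

-- the while-remove loop deletes exactly the empty strings
theorem pyRemoveEmpties_eq_filter (l : List String) :
    pyRemoveEmpties l = l.filter (fun p => !(p == "")) := by
  induction l using pyRemoveEmpties.induct with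
  | case1 l h ih =>
      rw [pyRemoveEmpties, dif_pos h, ih]
      clear ih
      induction l with
      | nil => simp
      | cons x xs ihx =>
          by_cases hx : x = ""
          · subst hx; simp
          · have hb : (x == "") = false := by simpa using hx
            simp only [List.erase_cons, hb, Bool.false_eq_true, if_false,
              List.filter_cons, Bool.not_false, if_true]
            rcases List.mem_cons.mp h with h' | h'
            · exact absurd h'.symm hx
            · rw [ihx h']
  | case2 l h =>
      rw [pyRemoveEmpties, dif_neg h, List.filter_eq_self.mpr]
      intro a ha
      have : a ≠ "" := fun e => h (e ▸ ha)
      simpa using this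

theorem ofList_sublist (l : List String) : (PySem.Set.ofList l).Sublist l := by
  induction l with
  | nil => simp [PySem.Set.ofList_nil]
  | cons x xs ih =>
      rw [PySem.Set.ofList_cons]
      refine List.Sublist.cons₂ x (List.Sublist.trans ?_ ih)
      unfold PySem.Set.discard
      exact List.filter_sublist

theorem setLength_lt_iff (l : List String) :
    (PySem.Set.ofList l).length < l.length ↔ ¬ l.Nodup := by
  constructor
  · intro hlt hnd
    rw [PySem.Set.ofList_eq_self_of_nodup l hnd] at hlt
    exact lt_irrefl _ hlt
  · intro hnd
    rcases Nat.lt_or_ge (PySem.Set.ofList l).length l.length with h | h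
    · exact h
    · have heq := (ofList_sublist l).eq_of_length_le h
      exact absurd (heq ▸ PySem.Set.nodup_ofList l) hnd

theorem altLoop_eq (l : List String) (seen : PySem.Set String) (hnd : seen.Nodup) :
    altLoop l seen = decide ((seen ++ l.filter (fun p => !(p == ""))).Nodup) := by
  induction l generalizing seen with
  | nil => simp [altLoop, hnd]
  | cons p rest ih =>
      by_cases hp : p = ""
      · subst hp; simp [altLoop, ih seen hnd]
      · have hpb : (p == "") = false := by simpa using hp
        simp only [altLoop, hpb, Bool.false_eq_true, if_false, List.filter_cons,
          Bool.not_false, if_true]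
        by_cases hmem : p ∈ seen
        · rw [if_pos ((PySem.Set.contains_iff seen p).mpr hmem)]
          have hnot : ¬ (seen ++ p :: rest.filter (fun p => !(p == ""))).Nodup := by
            intro hnodup
            rcases List.nodup_append.mp hnodup with ⟨_, _, hdisj⟩
            exact hdisj p hmem p (List.mem_cons_self ..) rfl
          simp [hnot]
        · have hc : PySem.Set.contains seen p = false := by
            simpa using hmem
          rw [hc]
          simp only [Bool.false_eq_true, if_false]
          have hadd : PySem.Set.add seen p = seen ++ [p] := by
            unfold PySem.Set.add
            simp [hmem]
          have hnd' : (PySem.Set.add seen p).Nodup := by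
            rw [hadd]
            exact List.Nodup.append hnd (List.nodup_singleton p)
              (by intro a ha hb; simp at hb; exact hmem (hb ▸ ha))
          rw [ih _ hnd', hadd, List.append_assoc]
          simp

-- ===== VERDICT (by name: the statement is the Claim_ definition above) =====
theorem check_param_validity_spec : Claim_equal_check_param_validity := by
  intro cmd ct _
  unfold Spec_check_param_validity check_param_validity check_param_validity_alt
  by_cases h1 : (PySem.Str.strip cmd) == ""
  · simp [h1]
  · simp only [h1, Bool.false_eq_true, if_false]
    cases h2 : PySem.Str.isIn ct cmd with
    | true =>
      simp only [Bool.not_true, Bool.false_eq_true, if_false]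
      set ws := (PySem.Str.split? cmd " ").getD [] with hws
      rw [altLoop_eq ws PySem.Set.empty (by simp [PySem.Set.empty]),
        pyRemoveEmpties_eq_filter]
      have hemp : (PySem.Set.empty : PySem.Set String) = [] := rfl
      rw [hemp, List.nil_append]
      by_cases hnd : (ws.filter (fun p => !(p == ""))).Nodup
      · rw [if_neg (by rw [setLength_lt_iff]; simpa using hnd)]
        simp [hnd]
      · rw [if_pos ((setLength_lt_iff _).mpr hnd)]
        simp [hnd]
    | false => simp only [Bool.not_false, if_pos]
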